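-- pv_equiv track=rewrite | github.com/zwingthomas/Advent-Of-Code | 2023/day3/matrix.py | search_around
-- ===== SOURCE A (Python) =====
-- def search_around(r, c, matrix):
--     directions = [(1, 1), (-1, -1), (-1, 1), (1, -1), (1, 0), (-1, 0), (0, 1), (0, -1)]
--     number = 0
--     if matrix[r][c].isdigit():
--         for dx, dy in directions:
--             if r + dx < len(matrix) and r + dx >= 0 and c + dy < len(matrix[r]) and c + dy >= 0 and matrix[r + dx][c + dy] != "." and not matrix[r + dx][c + dy].isdigit():
--                 # found a part, now find the number of that part
--                 while c >= 0 and matrix[r][c].isdigit():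
--                     c -= 1
--                 number = ""
--                 c += 1
--                 while c < len(matrix[r]) and matrix[r][c].isdigit():
--                     number += matrix[r][c]
--                     c += 1
--                 c -= 1
--                 number = int(number)
--                 return c, number
--     # return end of number (to not double count), and part number
--     return c, 0
-- ===== SOURCE B (Python) =====
-- def search_around(r, c, matrix):
--     row = matrix[r]
--     if not row[c].isdigit():
--         return c, 0
--     n, m = len(matrix), len(row)
--     offsets = [(dr, dc) for dr in (-1, 0, 1) for dc in (-1, 0, 1) if dr or dc]
--     if not any(0 <= r + dr < n and 0 <= c + dc < m
--                and matrix[r + dr][c + dc] != "."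
--                and not matrix[r + dr][c + dc].isdigit()
--                for dr, dc in offsets):
--         return c, 0
--     # build all maximal digit-run spans [a, b) of the row, then pick the one containing c
--     spans = []
--     start = None
--     for i, s in enumerate(row):
--         if s.isdigit():
--             if start is None:
--                 start = i
--         else:
--             if start is not None:
--                 spans.append((start, i))
--                 start = None
--     if start is not None:
--         spans.append((start, m))
--     for a, b in spans:
--         if a <= c < b:
--             return b - 1, int("".join(row[a:b]))
--     return c, 0  # unreachable for in-range c
-- ===== Notes on version B (the rewrite author's own statement) =====
-- stated objective: alternative
-- what changed: B replaces A's per-direction repeated found-branch with one any() over the 8 offsets, and replaces A's bidirectional in-place scan out from column c with building all maximal digit-run spans of the row in one forward pass and selecting the span containing c (joining its slice for the number).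
-- outside the precondition, e.g. on search_around(1, -1, [['#', '.', '.'], ['1', '.', '2']]): A returns (0, 1), B returns (-1, 0); on search_around(1, 0, [['1'], ['1', '1'], ['.', '#']]): A returns (1, 11), B raises IndexError
import Mathlib
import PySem

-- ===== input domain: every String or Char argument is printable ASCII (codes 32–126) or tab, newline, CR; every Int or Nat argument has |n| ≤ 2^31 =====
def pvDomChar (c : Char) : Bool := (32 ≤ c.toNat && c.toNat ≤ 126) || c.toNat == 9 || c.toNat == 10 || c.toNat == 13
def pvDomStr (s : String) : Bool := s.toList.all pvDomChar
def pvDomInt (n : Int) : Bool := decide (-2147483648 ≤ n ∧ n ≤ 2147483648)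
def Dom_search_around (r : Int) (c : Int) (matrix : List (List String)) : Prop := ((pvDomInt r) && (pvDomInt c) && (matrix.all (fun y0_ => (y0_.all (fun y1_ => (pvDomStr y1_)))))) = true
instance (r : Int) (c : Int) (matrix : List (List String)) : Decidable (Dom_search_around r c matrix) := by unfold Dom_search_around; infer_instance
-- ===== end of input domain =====

-- B replaces A's per-direction duplicated found-branch by a single any() over the 8 offsets and
-- replaces A's bidirectional scan out from column c by building all maximal digit-run spans of the
-- row in one forward pass and selecting the span containing c (alternative decomposition, same cost).


-- ===== PORT A =====
-- matrix[i][j], exact Python indexing (negative wraps); default only where Python raises (excluded by Pre_)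
def saAt (matrix : List (List String)) (i j : Int) : String :=
  PySem.List.pyGetD (PySem.List.pyGetD matrix i []) j ""

-- while c >= 0 and matrix[r][c].isdigit(): c -= 1
def saScanL (row : List String) (c : Int) : Int :=
  if _h : 0 ≤ c ∧ PySem.Str.strIsdigit (PySem.List.pyGetD row c "") = true then
    saScanL row (c - 1)
  else c
termination_by (c + 1).toNat
decreasing_by omega

-- while c < len(matrix[r]) and matrix[r][c].isdigit(): number += matrix[r][c]; c += 1
def saScanR (row : List String) (c : Int) (number : String) : Int × String :=
  if _h : c < (row.length : Int) ∧ PySem.Str.strIsdigit (PySem.List.pyGetD row c "") = true then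
    saScanR row (c + 1) (number ++ PySem.List.pyGetD row c "")
  else (c, number)
termination_by ((row.length : Int) - c).toNat
decreasing_by omega

-- the found-a-part branch (identical for every direction in A)
def saFound (r c : Int) (matrix : List (List String)) : Int × Int :=
  let row := PySem.List.pyGetD matrix r []
  let c1 := saScanL row c
  let p := saScanR row (c1 + 1) ""
  (p.1 - 1, (PySem.Int.ofStr? p.2).getD 0)

def saDirs : List (Int × Int) := [(1,1),(-1,-1),(-1,1),(1,-1),(1,0),(-1,0),(0,1),(0,-1)]

def saLoop (r c : Int) (matrix : List (List String)) : List (Int × Int) → Int × Int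
  | [] => (c, 0)
  | (dx, dy) :: rest =>
    if r + dx < (matrix.length : Int) ∧ 0 ≤ r + dx ∧
       c + dy < ((PySem.List.pyGetD matrix r []).length : Int) ∧ 0 ≤ c + dy ∧
       saAt matrix (r + dx) (c + dy) ≠ "." ∧
       ¬ PySem.Str.strIsdigit (saAt matrix (r + dx) (c + dy)) = true then
      saFound r c matrix
    else saLoop r c matrix rest

def search_around (r : Int) (c : Int) (matrix : List (List String)) : Int × Int :=
  if PySem.Str.strIsdigit (saAt matrix r c) = true then saLoop r c matrix saDirs
  else (c, 0)

-- ===== PORT B =====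
def sbAt (matrix : List (List String)) (i j : Int) : String :=
  PySem.List.pyGetD (PySem.List.pyGetD matrix i []) j ""

def sbOffsets : List (Int × Int) := [(-1,-1),(-1,0),(-1,1),(0,-1),(0,1),(1,-1),(1,0),(1,1)]

def sbAny (r c n m : Int) (matrix : List (List String)) : List (Int × Int) → Bool
  | [] => false
  | (dr, dc) :: rest =>
    if 0 ≤ r + dr ∧ r + dr < n ∧ 0 ≤ c + dc ∧ c + dc < m ∧
       sbAt matrix (r + dr) (c + dc) ≠ "." ∧
       ¬ PySem.Str.strIsdigit (sbAt matrix (r + dr) (c + dc)) = true then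
      true
    else sbAny r c n m matrix rest

-- one step of the span-building pass over enumerate(row)
def sbSpansStep (acc : List (Int × Int) × Option Int) (is : Int × String) : List (Int × Int) × Option Int :=
  if PySem.Str.strIsdigit is.2 = true then
    match acc.2 with
    | none => (acc.1, some is.1)
    | some a => (acc.1, some a)
  else
    match acc.2 with
    | none => (acc.1, none)
    | some a => (acc.1 ++ [(a, is.1)], none)

def sbSpans (row : List String) : List (Int × Int) :=
  let st := (PySem.List.enumerate row).foldl sbSpansStep ([], none)
  match st.2 with
  | none => st.1
  | some a => st.1 ++ [(a, (row.length : Int))]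

def sbLookup (row : List String) (c : Int) : List (Int × Int) → Int × Int
  | [] => (c, 0)
  | (a, b) :: rest =>
    if a ≤ c ∧ c < b then
      (b - 1, (PySem.Int.ofStr? (PySem.Str.join "" (PySem.List.slice row (some a) (some b)))).getD 0)
    else sbLookup row c rest

def search_around_alt (r : Int) (c : Int) (matrix : List (List String)) : Int × Int :=
  let row := PySem.List.pyGetD matrix r []
  if ¬ PySem.Str.strIsdigit (PySem.List.pyGetD row c "") = true then (c, 0)
  else if ¬ sbAny r c (matrix.length : Int) ((row.length : Int)) matrix sbOffsets = true then (c, 0)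
  else sbLookup row c (sbSpans row)

-- ===== PRECONDITION & SPEC =====
-- Pre_ excludes the inputs where Python A raises (row index out of range; digit cell whose guarded
-- neighbour read hits a shorter jagged row, IndexError; negative c on a digit cell, where int('')
-- can raise ValueError) and the negative-c digit cells where A returns the row's leading digit run
-- not containing cell c — an accident of Python's negative-index wraparound; the jagged bound also
-- drops a few direction-order-dependent jagged returns of A.
def Pre_search_around (r : Int) (c : Int) (matrix : List (List String)) : Prop :=
  PySem.Raise.InRange matrix.length r ∧
  PySem.Raise.InRange (PySem.List.pyGetD matrix r []).length c ∧
  (PySem.Str.strIsdigit (PySem.List.pyGetD (PySem.List.pyGetD matrix r []) c "") = true →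
    0 ≤ c ∧
    ∀ dr ∈ ([-1, 0, 1] : List Int), 0 ≤ r + dr → r + dr < (matrix.length : Int) →
      min (((PySem.List.pyGetD matrix r []).length : Int)) (c + 2) ≤
        ((PySem.List.pyGetD matrix (r + dr) []).length : Int))
instance (r : Int) (c : Int) (matrix : List (List String)) : Decidable (Pre_search_around r c matrix) := by
  unfold Pre_search_around; infer_instance

def pvWitness_search_around : Int × Int × List (List String) := (0, 0, [["1", "#"]])

def Spec_search_around (r : Int) (c : Int) (matrix : List (List String)) (out : Int × Int) : Prop := out = search_around_alt r c matrix
instance (r : Int) (c : Int) (matrix : List (List String)) (out : Int × Int) : Decidable (Spec_search_around r c matrix out) := by unfold Spec_search_around; infer_instance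

-- ===== CLAIM (what is proved, stated in full; the proofs are below) =====
def Claim_equal_search_around : Prop := ∀ (r : Int) (c : Int) (matrix : List (List String)), Dom_search_around r c matrix → Pre_search_around r c matrix → Spec_search_around r c matrix (search_around r c matrix)

-- ===== LEMMAS AND PROOFS =====

-- digit test at an Int index (the expression both ports read)
def digB (row : List String) (i : Int) : Bool :=
  PySem.Str.strIsdigit (PySem.List.pyGetD row i "")

-- maximal digit run [a, e) of the row
def MaxRun (row : List String) (a e : Int) : Prop :=
  0 ≤ a ∧ a < e ∧ e ≤ (row.length : Int) ∧
  (∀ i, a ≤ i → i < e → digB row i = true) ∧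
  (a = 0 ∨ digB row (a - 1) = false) ∧
  (e = (row.length : Int) ∨ digB row e = false)

theorem slice_cons_aux (row : List String) (c e : Int) (h0 : 0 ≤ c) (hce : c < e)
    (hem : e ≤ (row.length : Int)) :
    PySem.List.slice row (some c) (some e) =
      PySem.List.pyGetD row c "" :: PySem.List.slice row (some (c + 1)) (some e) := by
  rw [PySem.List.slice_toNat _ h0 (by omega), PySem.List.slice_toNat _ (by omega : (0:Int) ≤ c + 1) (by omega)]
  have hc : c.toNat < row.length := by omega
  rw [List.drop_eq_getElem_cons hc, PySem.List.pyGetD_eq_getElem _ _ h0 (by omega)]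
  have h1 : (c + 1).toNat = c.toNat + 1 := by omega
  have h2 : e.toNat - c.toNat = (e.toNat - (c.toNat + 1)) + 1 := by omega
  rw [h1, h2, List.take_succ_cons]

theorem scanL_spec (row : List String) :
    ∀ (k : Nat) (c : Int), c.toNat = k → 0 ≤ c → digB row c = true →
      0 ≤ saScanL row c + 1 ∧ saScanL row c + 1 ≤ c ∧
      (∀ i, saScanL row c + 1 ≤ i → i ≤ c → digB row i = true) ∧
      (saScanL row c + 1 = 0 ∨ digB row (saScanL row c) = false) := by
  intro k
  induction k using Nat.strong_induction_on with
  | _ k ih =>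
    intro c hk h0 hd
    rw [saScanL, dif_pos ⟨h0, hd⟩]
    by_cases h2 : 0 ≤ c - 1 ∧ PySem.Str.strIsdigit (PySem.List.pyGetD row (c - 1) "") = true
    · have IH := ih (c - 1).toNat (by omega) (c - 1) rfl h2.1 h2.2
      refine ⟨IH.1, by omega, ?_, IH.2.2.2⟩
      intro i hi1 hi2
      by_cases hic : i ≤ c - 1
      · exact IH.2.2.1 i hi1 hic
      · have hii : i = c := by omega
        rw [hii]; exact hd
    · rw [saScanL, dif_neg h2]
      refine ⟨by omega, by omega, ?_, ?_⟩
      · intro i hi1 hi2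
        have hii : i = c := by omega
        rw [hii]; exact hd
      · by_cases h3 : 0 ≤ c - 1
        · right
          have hne : ¬ PySem.Str.strIsdigit (PySem.List.pyGetD row (c - 1) "") = true :=
            fun hh => h2 ⟨h3, hh⟩
          simpa [digB] using hne
        · left; omega

theorem scanR_spec (row : List String) :
    ∀ (k : Nat) (c : Int) (acc : String), ((row.length : Int) - c).toNat = k → 0 ≤ c → c ≤ (row.length : Int) →
      c ≤ (saScanR row c acc).1 ∧ (saScanR row c acc).1 ≤ (row.length : Int) ∧
      (∀ i, c ≤ i → i < (saScanR row c acc).1 → digB row i = true) ∧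
      ((saScanR row c acc).1 = (row.length : Int) ∨ digB row (saScanR row c acc).1 = false) ∧
      (saScanR row c acc).2.toList =
        acc.toList ++ ((PySem.List.slice row (some c) (some (saScanR row c acc).1)).map String.toList).flatten := by
  intro k
  induction k using Nat.strong_induction_on with
  | _ k ih =>
    intro c acc hk h0 hm
    rw [saScanR]
    by_cases h : c < (row.length : Int) ∧ PySem.Str.strIsdigit (PySem.List.pyGetD row c "") = true
    · rw [dif_pos h]
      obtain ⟨i1, i2, i3, i4, i5⟩ := ih ((row.length : Int) - (c + 1)).toNat (by omega) (c + 1)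
        (acc ++ PySem.List.pyGetD row c "") rfl (by omega) (by omega)
      refine ⟨by omega, i2, ?_, i4, ?_⟩
      · intro i ha hb
        by_cases hic : c + 1 ≤ i
        · exact i3 i hic hb
        · have hii : i = c := by omega
          rw [hii]; exact h.2
      · rw [i5, slice_cons_aux row c _ h0 (by omega) i2]
        simp [List.append_assoc]
    · rw [dif_neg h]
      refine ⟨le_refl c, hm, ?_, ?_, ?_⟩
      · intro i ha hb; omega
      · by_cases h3 : c < (row.length : Int)
        · right
          have hne : ¬ PySem.Str.strIsdigit (PySem.List.pyGetD row c "") = true :=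
            fun hh => h ⟨h3, hh⟩
          simpa [digB] using hne
        · left; omega
      · rw [PySem.List.slice_toNat _ h0 h0]
        simp

-- reference recursion equal to B's foldl span pass
def runsF : List String → Int → Option Int → List (Int × Int) × Option Int
  | [], _, st => ([], st)
  | x :: xs, j, st =>
    if PySem.Str.strIsdigit x = true then runsF xs (j + 1) (some (st.getD j))
    else
      match st with
      | none => runsF xs (j + 1) none
      | some a => ((a, j) :: (runsF xs (j + 1) none).1, (runsF xs (j + 1) none).2)

theorem foldl_runs : ∀ (xs : List String) (j : Int) (spans : List (Int × Int)) (st : Option Int),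
    List.foldl sbSpansStep (spans, st) (PySem.List.enumerate xs j) =
      (spans ++ (runsF xs j st).1, (runsF xs j st).2) := by
  intro xs
  induction xs with
  | nil => intro j spans st; simp [PySem.List.enumerate_nil, runsF]
  | cons x xs ih =>
    intro j spans st
    rw [PySem.List.enumerate_cons, List.foldl_cons]
    by_cases hx : PySem.Chars.strIsdigit x.toList = true
    · cases st with
      | none => simp [sbSpansStep, hx, runsF, ih]
      | some a => simp [sbSpansStep, hx, runsF, ih]
    · cases st with
      | none => simp [sbSpansStep, hx, runsF, ih]
      | some a => simp [sbSpansStep, hx, runsF, ih]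

def finalize (row : List String) (p : List (Int × Int) × Option Int) : List (Int × Int) :=
  match p.2 with
  | none => p.1
  | some a => p.1 ++ [(a, (row.length : Int))]

def InvB (row : List String) (j : Nat) : Option Int → Prop
  | none => (j = 0 ∨ digB row ((j : Int) - 1) = false)
  | some a => 0 ≤ a ∧ a < (j : Int) ∧ (∀ i, a ≤ i → i < (j : Int) → digB row i = true) ∧
      (a = 0 ∨ digB row (a - 1) = false)

def lbB (j : Nat) : Option Int → Int
  | none => (j : Int)
  | some a => a

theorem finalize_cons (row : List String) (q : Int × Int) (l : List (Int × Int)) (o : Option Int) :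
    finalize row (q :: l, o) = q :: finalize row (l, o) := by
  cases o <;> simp [finalize]

theorem runs_char (row : List String) : ∀ (xs : List String) (j : Nat) (st : Option Int),
    row.drop j = xs → j ≤ row.length → InvB row j st →
    ∀ a e : Int, ((a, e) ∈ finalize row (runsF xs (j : Int) st) ↔ (MaxRun row a e ∧ lbB j st ≤ a)) := by
  intro xs
  induction xs with
  | nil =>
    intro j st hdrop hj hinv a e
    have hjlen : j = row.length := by
      have hle := List.drop_eq_nil_iff.mp hdrop
      omega
    subst hjlen
    cases st with
    | none =>
      constructor
      · intro h
        simp [runsF, finalize] at h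
      · rintro ⟨⟨h0, hae, hem, _⟩, hlb⟩
        simp only [lbB] at hlb
        exfalso; omega
    | some a0 =>
      obtain ⟨p1, p2, p3, p4⟩ := hinv
      constructor
      · intro h
        simp only [runsF, finalize, List.nil_append, List.mem_singleton, Prod.mk.injEq] at h
        obtain ⟨rfl, rfl⟩ := h
        exact ⟨⟨p1, by omega, le_refl _, p3, p4, Or.inl rfl⟩, le_refl _⟩
      · rintro ⟨⟨m0, mae, mem_, mdig, ml, mr⟩, hlb⟩
        simp only [lbB] at hlb
        have haa : a = a0 := by
          by_contra hne
          have hgt : a0 < a := by omega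
          have hd1 : digB row (a - 1) = true := p3 (a - 1) (by omega) (by omega)
          rcases ml with h0 | hf
          · omega
          · rw [hd1] at hf; exact absurd hf (by simp)
        have hee : e = (row.length : Int) := by
          by_contra hne
          have helt : e < (row.length : Int) := by omega
          have hd1 : digB row e = true := p3 e (by omega) (by omega)
          rcases mr with h0 | hf
          · omega
          · rw [hd1] at hf; exact absurd hf (by simp)
        subst haa; subst hee
        simp [runsF, finalize]
  | cons x xs ih =>
    intro j st hdrop hj hinv a e
    have hjlt : j < row.length := by
      have hlen := congrArg List.length hdrop
      simp [List.length_drop] at hlen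
      omega
    have hdrop' := hdrop
    rw [List.drop_eq_getElem_cons hjlt, List.cons.injEq] at hdrop'
    obtain ⟨hx', hxs⟩ := hdrop'
    have hx : x = row[j] := hx'.symm
    have hdigj : digB row (j : Int) = PySem.Str.strIsdigit x := by
      rw [digB, PySem.List.pyGetD_eq_getElem _ _ (by omega) (by exact_mod_cast hjlt)]
      rw [hx]
      norm_num
    have hcast : ((j + 1 : Nat) : Int) = (j : Int) + 1 := by push_cast; ring
    simp only [runsF]
    by_cases hd : PySem.Str.strIsdigit x = true
    · rw [if_pos hd]
      have hinv' : InvB row (j + 1) (some (st.getD (j : Int))) := by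
        cases st with
        | none =>
          simp only [Option.getD_none]
          refine ⟨by omega, by omega, ?_, ?_⟩
          · intro i hi1 hi2
            have hii : i = (j : Int) := by push_cast at hi2; omega
            rw [hii, hdigj]; exact hd
          · simpa [Option.getD] using hinv
        | some a0 =>
          simp only [Option.getD_some]
          obtain ⟨p1, p2, p3, p4⟩ := hinv
          refine ⟨p1, by push_cast; omega, ?_, p4⟩
          intro i hi1 hi2
          by_cases hic : i < (j : Int)
          · exact p3 i hi1 hic
          · have hii : i = (j : Int) := by push_cast at hi2; omega
            rw [hii, hdigj]; exact hd
      have hIH := ih (j + 1) (some (st.getD (j : Int))) hxs (by omega) hinv' a e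
      rw [hcast] at hIH
      rw [hIH]
      cases st with
      | none => simp [lbB, Option.getD]
      | some a0 => simp [lbB, Option.getD]
    · rw [if_neg hd]
      have hdigjf : digB row (j : Int) = false := by
        rw [hdigj]; exact Bool.not_eq_true _ ▸ hd
      cases st with
      | none =>
        have hIH := ih (j + 1) none hxs (by omega) (Or.inr (by rwa [hcast, show ((j:Int) + 1 - 1) = (j:Int) by ring])) a e
        rw [hcast] at hIH
        rw [hIH]
        constructor
        · rintro ⟨M, hlb⟩
          exact ⟨M, by simp only [lbB] at hlb ⊢; omega⟩
        · rintro ⟨M, hlb⟩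
          refine ⟨M, ?_⟩
          simp only [lbB] at hlb ⊢
          by_contra hno
          have haj : a = (j : Int) := by push_cast at hno ⊢; omega
          obtain ⟨m0, mae, mem_, mdig, ml, mr⟩ := M
          have := mdig a (le_refl _) (by omega)
          rw [haj, hdigjf] at this
          exact absurd this (by simp)
      | some a0 =>
        obtain ⟨p1, p2, p3, p4⟩ := hinv
        have hIH := ih (j + 1) none hxs (by omega) (Or.inr (by rwa [hcast, show ((j:Int) + 1 - 1) = (j:Int) by ring])) a e
        rw [hcast] at hIH
        simp only [finalize_cons]
        have hMhead : MaxRun row a0 (j : Int) :=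
          ⟨p1, p2, by exact_mod_cast le_of_lt hjlt, p3, p4, Or.inr hdigjf⟩
        constructor
        · intro hmem
          rcases List.mem_cons.mp hmem with heq | hmem'
          · obtain ⟨rfl, rfl⟩ := Prod.mk.injEq .. ▸ heq
            exact ⟨hMhead, le_refl _⟩
          · obtain ⟨M, hge⟩ := (hIH).mp hmem'
            simp only [lbB] at hge ⊢
            exact ⟨M, by omega⟩
        · rintro ⟨M, hge⟩
          simp only [lbB] at hge
          by_cases ha : a = a0
          · subst ha
            obtain ⟨m0, mae, mem_, mdig, ml, mr⟩ := M
            have hej : e = (j : Int) := by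
              rcases lt_trichotomy e (j : Int) with hlt | heq | hgt
              · exfalso
                have hdt : digB row e = true := p3 e (by omega) hlt
                rcases mr with h0 | hf
                · have : e < (row.length : Int) := by exact_mod_cast lt_of_lt_of_le hlt (by exact_mod_cast le_of_lt hjlt)
                  omega
                · rw [hdt] at hf; exact absurd hf (by simp)
              · exact heq
              · exfalso
                have hdt : digB row (j : Int) = true := mdig (j : Int) (by omega) hgt
                rw [hdigjf] at hdt
                exact absurd hdt (by simp)
            subst hej
            exact List.mem_cons_self
          · have hge1 : (j : Int) + 1 ≤ a := by
              obtain ⟨m0, mae, mem_, mdig, ml, mr⟩ := M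
              by_contra hno
              by_cases haj : a = (j : Int)
              · have := mdig a (le_refl _) (by omega)
                rw [haj, hdigjf] at this
                exact absurd this (by simp)
              · have halt : a < (j : Int) := by omega
                have hdt : digB row (a - 1) = true := p3 (a - 1) (by omega) (by omega)
                rcases ml with h0 | hf
                · omega
                · rw [hdt] at hf; exact absurd hf (by simp)
            exact List.mem_cons_of_mem _ ((hIH).mpr ⟨M, by simp only [lbB]; omega⟩)

theorem spans_char (row : List String) (a e : Int) :
    (a, e) ∈ sbSpans row ↔ MaxRun row a e := by
  have hchar := runs_char row row 0 none rfl (Nat.zero_le _) (Or.inl rfl) a e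
  have hs : sbSpans row = finalize row (runsF row 0 none) := by
    rw [sbSpans, foldl_runs row 0 [] none]
    cases hr2 : (runsF row (0 : Int) none).2 with
    | none => simp [finalize, hr2]
    | some a0 => simp [finalize, hr2]
  rw [hs]
  rw [show ((0 : Nat) : Int) = (0 : Int) from rfl] at hchar
  rw [hchar]
  simp only [lbB]
  constructor
  · rintro ⟨M, _⟩; exact M
  · intro M; exact ⟨M, by exact_mod_cast M.1⟩

theorem maxrun_unique (row : List String) {a e a' e' c : Int}
    (h1 : MaxRun row a e) (h2 : MaxRun row a' e')
    (hc1 : a ≤ c) (hc2 : c < e) (hc3 : a' ≤ c) (hc4 : c < e') : a = a' ∧ e = e' := by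
  obtain ⟨ha0, hae, hem, hdig, hl, hr⟩ := h1
  obtain ⟨ha0', hae', hem', hdig', hl', hr'⟩ := h2
  have haa : a = a' := by
    rcases lt_trichotomy a a' with h | h | h
    · exfalso
      have hd := hdig (a' - 1) (by omega) (by omega)
      rcases hl' with h0 | hf
      · omega
      · rw [hd] at hf; exact absurd hf (by simp)
    · exact h
    · exfalso
      have hd := hdig' (a - 1) (by omega) (by omega)
      rcases hl with h0 | hf
      · omega
      · rw [hd] at hf; exact absurd hf (by simp)
  refine ⟨haa, ?_⟩
  rcases lt_trichotomy e e' with h | h | h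
  · exfalso
    have hd := hdig' e (by omega) (by omega)
    rcases hr with h0 | hf
    · omega
    · rw [hd] at hf; exact absurd hf (by simp)
  · exact h
  · exfalso
    have hd := hdig e' (by omega) (by omega)
    rcases hr' with h0 | hf
    · omega
    · rw [hd] at hf; exact absurd hf (by simp)

theorem lookup_spec (row : List String) (c a e : Int) (hM : MaxRun row a e)
    (hc1 : a ≤ c) (hc2 : c < e) :
    ∀ L : List (Int × Int), (∀ p ∈ L, MaxRun row p.1 p.2) → (a, e) ∈ L →
    sbLookup row c L =
      (e - 1, (PySem.Int.ofStr? (PySem.Str.join "" (PySem.List.slice row (some a) (some e)))).getD 0) := by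
  intro L
  induction L with
  | nil => intro _ hmem; exact absurd hmem (List.not_mem_nil)
  | cons hd tl ih =>
    intro hall hmem
    obtain ⟨a', b'⟩ := hd
    rw [sbLookup]
    by_cases h : a' ≤ c ∧ c < b'
    · rw [if_pos h]
      have hM' : MaxRun row a' b' := hall (a', b') List.mem_cons_self
      obtain ⟨h1, h2⟩ := maxrun_unique row hM hM' hc1 hc2 h.1 h.2
      rw [← h1, ← h2]
    · rw [if_neg h]
      rcases List.mem_cons.mp hmem with heq | hmem'
      · exfalso; apply h; constructor
        · rw [show a' = a from (Prod.mk.injEq _ _ _ _ ▸ heq.symm).1]; exact hc1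
        · rw [show b' = e from (Prod.mk.injEq _ _ _ _ ▸ heq.symm).2]; exact hc2
      · exact ih (fun p hp => hall p (List.mem_cons_of_mem _ hp)) hmem' 

theorem join_empty_toList (L : List String) :
    (PySem.Str.join "" L).toList = (L.map String.toList).flatten := by
  rw [PySem.Str.toList_join]
  have he : ("" : String).toList = [] := rfl
  rw [he]
  induction L with
  | nil => simp [PySem.Chars.join_nil]
  | cons x xs ih =>
    cases xs with
    | nil => simp [PySem.Chars.join_singleton]
    | cons y ys =>
      simp only [List.map_cons] at ih ⊢
      rw [PySem.Chars.join_cons_cons]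
      simp only [List.flatten_cons] at ih ⊢
      rw [← ih]
      simp

-- A's direction loop returns the found-branch iff some direction matches
theorem saLoop_eq (r c : Int) (matrix : List (List String)) :
    ∀ L : List (Int × Int),
    saLoop r c matrix L =
      if (∃ p ∈ L, r + p.1 < (matrix.length : Int) ∧ 0 ≤ r + p.1 ∧
          c + p.2 < ((PySem.List.pyGetD matrix r []).length : Int) ∧ 0 ≤ c + p.2 ∧
          saAt matrix (r + p.1) (c + p.2) ≠ "." ∧
          ¬ PySem.Str.strIsdigit (saAt matrix (r + p.1) (c + p.2)) = true)
      then saFound r c matrix else (c, 0) := by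
  intro L
  induction L with
  | nil => simp [saLoop]
  | cons hd tl ih =>
    obtain ⟨dx, dy⟩ := hd
    rw [saLoop, ih]
    simp only [List.exists_mem_cons_iff]
    by_cases h : r + dx < (matrix.length : Int) ∧ 0 ≤ r + dx ∧
        c + dy < ((PySem.List.pyGetD matrix r []).length : Int) ∧ 0 ≤ c + dy ∧
        saAt matrix (r + dx) (c + dy) ≠ "." ∧
        ¬ PySem.Str.strIsdigit (saAt matrix (r + dx) (c + dy)) = true
    · rw [if_pos h, if_pos (Or.inl h)]
    · rw [if_neg h]
      exact (if_congr (or_iff_right h) rfl rfl).symm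

theorem sbAny_iff (r c n m : Int) (matrix : List (List String)) :
    ∀ L : List (Int × Int),
    (sbAny r c n m matrix L = true ↔ ∃ p ∈ L, 0 ≤ r + p.1 ∧ r + p.1 < n ∧ 0 ≤ c + p.2 ∧ c + p.2 < m ∧
      sbAt matrix (r + p.1) (c + p.2) ≠ "." ∧
      ¬ PySem.Str.strIsdigit (sbAt matrix (r + p.1) (c + p.2)) = true) := by
  intro L
  induction L with
  | nil => simp [sbAny]
  | cons hd tl ih =>
    obtain ⟨dr, dc⟩ := hd
    rw [sbAny]
    simp only [List.exists_mem_cons_iff]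
    by_cases h : 0 ≤ r + dr ∧ r + dr < n ∧ 0 ≤ c + dc ∧ c + dc < m ∧
        sbAt matrix (r + dr) (c + dc) ≠ "." ∧
        ¬ PySem.Str.strIsdigit (sbAt matrix (r + dr) (c + dc)) = true
    · rw [if_pos h]
      simp only [true_iff]
      exact Or.inl h
    · rw [if_neg h, ih]
      exact (or_iff_right h).symm

theorem exists_offsets_iff (r c : Int) (matrix : List (List String)) :
    (∃ p ∈ saDirs, r + p.1 < (matrix.length : Int) ∧ 0 ≤ r + p.1 ∧
        c + p.2 < ((PySem.List.pyGetD matrix r []).length : Int) ∧ 0 ≤ c + p.2 ∧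
        saAt matrix (r + p.1) (c + p.2) ≠ "." ∧
        ¬ PySem.Str.strIsdigit (saAt matrix (r + p.1) (c + p.2)) = true) ↔
    (∃ p ∈ sbOffsets, 0 ≤ r + p.1 ∧ r + p.1 < (matrix.length : Int) ∧ 0 ≤ c + p.2 ∧
        c + p.2 < ((PySem.List.pyGetD matrix r []).length : Int) ∧
        sbAt matrix (r + p.1) (c + p.2) ≠ "." ∧
        ¬ PySem.Str.strIsdigit (sbAt matrix (r + p.1) (c + p.2)) = true) := by
  constructor
  · rintro ⟨p, hp, h1, h2, h3, h4, h5, h6⟩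
    refine ⟨p, ?_, h2, h1, h4, h3, h5, h6⟩
    fin_cases hp <;> decide
  · rintro ⟨p, hp, h1, h2, h3, h4, h5, h6⟩
    refine ⟨p, ?_, h2, h1, h4, h3, h5, h6⟩
    fin_cases hp <;> decide

theorem run_eq (row : List String) (c : Int) (hd : digB row c = true) (hc0 : 0 ≤ c)
    (hcm : c < (row.length : Int)) :
    ((saScanR row (saScanL row c + 1) "").1 - 1,
      (PySem.Int.ofStr? (saScanR row (saScanL row c + 1) "").2).getD 0) =
    sbLookup row c (sbSpans row) := by
  obtain ⟨l1, l2, l3, l4⟩ := scanL_spec row c.toNat c rfl hc0 hd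
  obtain ⟨r1, r2, r3, r4, r5⟩ :=
    scanR_spec row ((row.length : Int) - (saScanL row c + 1)).toNat (saScanL row c + 1) "" rfl l1 (by omega)
  have hce : c < (saScanR row (saScanL row c + 1) "").1 := by
    by_contra hno
    rw [not_lt] at hno
    have hdt : digB row (saScanR row (saScanL row c + 1) "").1 = true :=
      l3 _ r1 hno
    rcases r4 with h0 | hf
    · omega
    · rw [hdt] at hf; exact absurd hf (by simp)
  have hM : MaxRun row (saScanL row c + 1) (saScanR row (saScanL row c + 1) "").1 := by
    refine ⟨l1, by omega, r2, r3, ?_, r4⟩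
    rcases l4 with h0 | hf
    · exact Or.inl h0
    · right
      rw [show saScanL row c + 1 - 1 = saScanL row c by ring]
      exact hf
  have hmem : ((saScanL row c + 1), (saScanR row (saScanL row c + 1) "").1) ∈ sbSpans row :=
    (spans_char row _ _).mpr hM
  have hall : ∀ p ∈ sbSpans row, MaxRun row p.1 p.2 := by
    intro p hp
    exact (spans_char row p.1 p.2).mp (by simpa using hp)
  rw [lookup_spec row c _ _ hM l2 hce _ hall hmem]
  have hstr : (saScanR row (saScanL row c + 1) "").2 =
      PySem.Str.join "" (PySem.List.slice row (some (saScanL row c + 1))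
        (some (saScanR row (saScanL row c + 1) "").1)) := by
    apply String.toList_inj.mp
    rw [r5, join_empty_toList]
    simp
  rw [hstr]

-- ===== VERDICT (by name: the statement is the Claim_ definition above) =====
theorem search_around_spec : Claim_equal_search_around := by
  intro r c matrix hdom hpre
  unfold Spec_search_around
  obtain ⟨hr, hcr, hdigpre⟩ := hpre
  rw [search_around, search_around_alt]
  simp only [saAt]
  by_cases hd : PySem.Str.strIsdigit (PySem.List.pyGetD (PySem.List.pyGetD matrix r []) c "") = true
  · obtain ⟨hc0, _⟩ := hdigpre hd
    have hcm : c < ((PySem.List.pyGetD matrix r []).length : Int) := hcr.2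
    rw [if_pos hd, if_neg (not_not_intro hd)]
    rw [saLoop_eq r c matrix saDirs]
    by_cases hex : ∃ p ∈ saDirs, r + p.1 < (matrix.length : Int) ∧ 0 ≤ r + p.1 ∧
        c + p.2 < ((PySem.List.pyGetD matrix r []).length : Int) ∧ 0 ≤ c + p.2 ∧
        saAt matrix (r + p.1) (c + p.2) ≠ "." ∧
        ¬ PySem.Str.strIsdigit (saAt matrix (r + p.1) (c + p.2)) = true
    · rw [if_pos hex]
      have hanyB : sbAny r c (matrix.length : Int) ((PySem.List.pyGetD matrix r []).length : Int)
          matrix sbOffsets = true :=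
        (sbAny_iff r c _ _ matrix sbOffsets).mpr ((exists_offsets_iff r c matrix).mp hex)
      rw [if_neg (not_not_intro hanyB)]
      rw [saFound]
      exact run_eq (PySem.List.pyGetD matrix r []) c hd hc0 hcm
    · rw [if_neg hex]
      have hanyB : ¬ sbAny r c (matrix.length : Int) ((PySem.List.pyGetD matrix r []).length : Int)
          matrix sbOffsets = true :=
        fun hh => hex ((exists_offsets_iff r c matrix).mpr ((sbAny_iff r c _ _ matrix sbOffsets).mp hh))
      rw [if_pos hanyB]
  · rw [if_neg hd, if_pos hd]
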